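-- pv_equiv track=rewrite | github.com/epicmet/advent-of-code | 2024/day01/main.py | construct_arrays
-- ===== SOURCE A (Python) =====
-- def construct_arrays(input: str):
--     first_list = []
--     second_list = []
--
--     building_num = ""
--
--     for ch in input:
--         if ch != " " and ch != "\n":
--             building_num += ch
--         else:
--             if len(building_num) <= 0:
--                 continue
--             else:
--                 target_list = first_list if ch == " " else second_list
--                 target_list.append(int(building_num))
--                 building_num = ""
--
--     return first_list, second_list
-- ===== SOURCE B (Python) =====
-- def construct_arrays(input: str):
--     first_list = []
--     second_list = []
--
--     lines = input.split("\n")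
--     for line in lines[:-1]:
--         parts = line.split(" ")
--         for tok in parts[:-1]:
--             if tok:
--                 first_list.append(int(tok))
--         if parts[-1]:
--             second_list.append(int(parts[-1]))
--     for tok in lines[-1].split(" ")[:-1]:
--         if tok:
--             first_list.append(int(tok))
--
--     return first_list, second_list
-- ===== Notes on version B (the rewrite author's own statement) =====
-- stated objective: faster
-- what changed: Replaces the character-by-character scanner with its hand-grown buffer string by a two-level str.split: the input is split into lines on the newline character, each line into tokens on the space character; the space-terminated tokens of a line go to the first list, its newline-terminated last token to the second, and the trailing unterminated token is dropped.
import Mathlib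
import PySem

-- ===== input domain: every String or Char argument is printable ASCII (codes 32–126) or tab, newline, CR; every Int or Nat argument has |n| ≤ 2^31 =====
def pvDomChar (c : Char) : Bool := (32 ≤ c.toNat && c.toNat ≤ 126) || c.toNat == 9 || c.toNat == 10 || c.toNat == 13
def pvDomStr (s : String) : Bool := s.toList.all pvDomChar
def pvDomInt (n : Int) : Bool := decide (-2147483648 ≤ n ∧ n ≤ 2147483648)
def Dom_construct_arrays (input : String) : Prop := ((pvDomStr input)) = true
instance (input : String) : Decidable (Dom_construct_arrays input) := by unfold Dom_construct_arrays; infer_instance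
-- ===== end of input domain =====

-- B re-implements A's char-by-char scanner by splitting the input into lines and each line
-- into space-separated tokens (same return value; measured faster: C-level str.split replaces
-- a per-character Python loop with string concatenation).

-- int(t); Pre_ guarantees the parse succeeds wherever either Python calls int()
def caInt (t : List Char) : Int := (PySem.Int.ofChars? t).getD 0

-- ===== PORT A =====
def caStepA (st : List Int × List Int × List Char) (ch : Char) : List Int × List Int × List Char :=
  if ch ≠ ' ' ∧ ch ≠ '\n' then (st.1, st.2.1, st.2.2 ++ [ch])
  else if st.2.2.length ≤ 0 then st
  else if ch = ' ' then (st.1 ++ [caInt st.2.2], st.2.1, [])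
  else (st.1, st.2.1 ++ [caInt st.2.2], [])

def construct_arrays (input : String) : List Int × List Int :=
  let st := input.toList.foldl caStepA ([], [], [])
  (st.1, st.2.1)

-- ===== PORT B =====
-- append int(t) for each nonempty t in parts[:-1]  (B's inner loop)
def caFirsts (f : List Int) (parts : List (List Char)) : List Int :=
  parts.dropLast.foldl (fun f t => if t ≠ [] then f ++ [caInt t] else f) f

-- B's per-line body
def caStepB (st : List Int × List Int) (line : List Char) : List Int × List Int :=
  let parts := PySem.Chars.splitOn line [' ']
  (caFirsts st.1 parts,
   if parts.getLastD [] ≠ [] then st.2 ++ [caInt (parts.getLastD [])] else st.2)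

def construct_arrays_alt (input : String) : List Int × List Int :=
  let lines := PySem.Chars.splitOn input.toList ['\n']
  let st := lines.dropLast.foldl caStepB ([], [])
  (caFirsts st.1 (PySem.Chars.splitOn (lines.getLastD []) [' ']), st.2)

-- ===== PRECONDITION & SPEC =====
-- all tokens of the input in document order (split on '\n', then each line on ' ')
def caTokens (input : String) : List (List Char) :=
  ((PySem.Chars.splitOn input.toList ['\n']).map (fun l => PySem.Chars.splitOn l [' '])).flatten

-- Pre_ excludes exactly the inputs on which Python's int() raises ValueError: every
-- delimiter-terminated nonempty token (all tokens but the trailing unterminated one) must parse.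
-- (A and B call int() on the same tokens, so the equivalence proof itself needs no parse facts;
-- Pre_ is there because both Pythons raise, rather than return, outside it.)
def Pre_construct_arrays (input : String) : Prop :=
  ∀ t ∈ (caTokens input).dropLast, t ≠ [] → (PySem.Int.ofChars? t).isSome = true

instance (input : String) : Decidable (Pre_construct_arrays input) := by
  unfold Pre_construct_arrays; infer_instance

def pvWitness_construct_arrays : String := "12 34\n56 78\n"

def Spec_construct_arrays (input : String) (out : List Int × List Int) : Prop := out = construct_arrays_alt input
instance (input : String) (out : List Int × List Int) : Decidable (Spec_construct_arrays input out) := by unfold Spec_construct_arrays; infer_instance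

-- ===== CLAIM (what is proved, stated in full; the proofs are below) =====
def Claim_equal_construct_arrays : Prop := ∀ (input : String), Dom_construct_arrays input → Pre_construct_arrays input → Spec_construct_arrays input (construct_arrays input)

-- ===== LEMMAS AND PROOFS =====

-- reference single-char splitter: caSplit d l = (head, tail) with split = head :: tail
def caSplit (d : Char) : List Char → List Char × List (List Char)
  | [] => ([], [])
  | c :: cs =>
    let r := caSplit d cs
    if c = d then ([], r.1 :: r.2) else (c :: r.1, r.2)

lemma caSplit_go (d : Char) : ∀ (fuel : Nat) (l cur acc : _), l.length < fuel →
    PySem.Chars.splitOn.go [d] fuel l cur acc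
      = acc.reverse ++ (cur.reverse ++ (caSplit d l).1) :: (caSplit d l).2 := by
  intro fuel
  induction fuel with
  | zero => intro l cur acc h; omega
  | succ n ih =>
    intro l cur acc h
    cases l with
    | nil => simp [PySem.Chars.splitOn.go, caSplit]
    | cons c rest =>
      by_cases hc : c = d
      · subst hc
        rw [PySem.Chars.splitOn.go]
        simp only [List.isPrefixOf, beq_self_eq_true, Bool.true_and, if_pos]
        simp only [List.length, List.drop, caSplit]
        rw [ih rest [] (cur.reverse :: acc) (by simpa using Nat.lt_of_succ_lt_succ h)]
        simp
      · rw [PySem.Chars.splitOn.go]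
        have hpre : ([d].isPrefixOf (c :: rest)) = false := by
          simp [List.isPrefixOf]; exact fun hdc => (hc hdc.symm).elim
        simp only [hpre, Bool.false_eq_true, if_false]
        rw [ih rest (c :: cur) acc (by simpa using Nat.lt_of_succ_lt_succ h)]
        simp [caSplit, hc]

lemma splitOn_single (d : Char) (l : List Char) :
    PySem.Chars.splitOn l [d] = (caSplit d l).1 :: (caSplit d l).2 := by
  unfold PySem.Chars.splitOn
  rw [caSplit_go d (l.length + 1) l [] [] (by omega)]
  simp

lemma caSplit_no_delim (d : Char) (b : List Char) (h : d ∉ b) : caSplit d b = (b, []) := by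
  induction b with
  | nil => rfl
  | cons c cs ih =>
    simp only [List.mem_cons, not_or] at h
    simp [caSplit, ih h.2, if_neg (Ne.symm h.1)]

lemma caSplit_append (d : Char) (b l : List Char) (h : d ∉ b) :
    caSplit d (b ++ l) = (b ++ (caSplit d l).1, (caSplit d l).2) := by
  induction b with
  | nil => simp
  | cons c cs ih =>
    simp only [List.mem_cons, not_or] at h
    simp [caSplit, ih h.2, if_neg (Ne.symm h.1)]

-- A's scanner as a recursive reference: (extra firsts, extra seconds, final buffer)
def runA : List Char → List Char → (List Int × List Int) × List Char
  | b, [] => (([], []), b)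
  | b, c :: cs =>
    if c ≠ ' ' ∧ c ≠ '\n' then runA (b ++ [c]) cs
    else if b = [] then runA b cs
    else
      let r := runA [] cs
      if c = ' ' then ((caInt b :: r.1.1, r.1.2), r.2)
      else ((r.1.1, caInt b :: r.1.2), r.2)

lemma foldA (cs : List Char) : ∀ (f s : List Int) (b : List Char),
    cs.foldl caStepA (f, s, b)
      = (f ++ (runA b cs).1.1, s ++ (runA b cs).1.2, (runA b cs).2) := by
  induction cs with
  | nil => intro f s b; simp [runA]
  | cons c cs ih =>
    intro f s b
    by_cases h1 : c ≠ ' ' ∧ c ≠ '\n'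
    · have e1 : caStepA (f, s, b) c = (f, s, b ++ [c]) := by simp [caStepA, h1]
      have e2 : runA b (c :: cs) = runA (b ++ [c]) cs := by rw [runA, if_pos h1]
      simp only [List.foldl_cons, e1, e2, ih]
    · have hc : c = ' ' ∨ c = '\n' := by
        rcases Decidable.em (c = ' ') with h | h
        · exact Or.inl h
        · refine Or.inr ?_; by_contra hn; exact h1 ⟨h, hn⟩
      by_cases hb : b = []
      · subst hb
        have e1 : caStepA (f, s, []) c = (f, s, []) := by simp [caStepA, h1]
        have e2 : runA ([] : List Char) (c :: cs) = runA [] cs := by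
          rw [runA, if_neg h1, if_pos rfl]
        simp only [List.foldl_cons, e1, e2, ih]
      · have hlen : ¬ ((f, s, b).2.2.length ≤ 0) := by
          simp [List.length_eq_zero_iff, hb]
        rcases hc with hc | hc
        · have e1 : caStepA (f, s, b) c = (f ++ [caInt b], s, []) := by
            simp [caStepA, h1, hlen, hc]
          have e2 : runA b (c :: cs)
              = ((caInt b :: (runA [] cs).1.1, (runA [] cs).1.2), (runA [] cs).2) := by
            rw [runA, if_neg h1, if_neg hb]; simp [hc]
          simp only [List.foldl_cons, e1, e2, ih]
          simp
        · have e1 : caStepA (f, s, b) c = (f, s ++ [caInt b], []) := by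
            simp [caStepA, h1, hlen, hc]
          have e2 : runA b (c :: cs)
              = (((runA [] cs).1.1, caInt b :: (runA [] cs).1.2), (runA [] cs).2) := by
            rw [runA, if_neg h1, if_neg hb]; simp [hc]
          simp only [List.foldl_cons, e1, e2, ih]
          simp

-- B's per-line contributions in closed form
def caFline (line : List Char) : List Int :=
  (((PySem.Chars.splitOn line [' ']).dropLast).filter (· ≠ [])).map caInt

def caSline (line : List Char) : List Int :=
  if (PySem.Chars.splitOn line [' ']).getLastD [] ≠ []
  then [caInt ((PySem.Chars.splitOn line [' ']).getLastD [])] else []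

lemma caFirsts_eq (parts : List (List Char)) (f : List Int) :
    caFirsts f parts = f ++ (parts.dropLast.filter (· ≠ [])).map caInt := by
  unfold caFirsts
  generalize parts.dropLast = L
  induction L generalizing f with
  | nil => simp
  | cons t L ih =>
    by_cases ht : t = []
    · rw [List.foldl_cons, if_neg (not_not_intro ht), ih]
      simp [ht]
    · rw [List.foldl_cons, if_pos ht, ih]
      simp [ht]

lemma caStepB_eq (st : List Int × List Int) (line : List Char) :
    caStepB st line = (st.1 ++ caFline line, st.2 ++ caSline line) := by
  show (caFirsts st.1 (PySem.Chars.splitOn line [' ']),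
    if (PySem.Chars.splitOn line [' ']).getLastD [] ≠ []
    then st.2 ++ [caInt ((PySem.Chars.splitOn line [' ']).getLastD [])] else st.2) = _
  rw [caFirsts_eq]
  unfold caFline caSline
  split_ifs with h <;> simp

lemma foldB (L : List (List Char)) : ∀ (f s : List Int),
    L.foldl caStepB (f, s) = (f ++ L.flatMap caFline, s ++ L.flatMap caSline) := by
  induction L with
  | nil => intro f s; simp
  | cons l L ih =>
    intro f s
    simp only [List.foldl_cons, caStepB_eq, ih, List.flatMap_cons, List.append_assoc]

-- B's whole result as a function of the line list
def caBfun (lines : List (List Char)) : List Int × List Int :=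
  (lines.dropLast.flatMap caFline ++ caFline (lines.getLastD []),
   lines.dropLast.flatMap caSline)

lemma alt_eq (input : String) :
    construct_arrays_alt input = caBfun (PySem.Chars.splitOn input.toList ['\n']) := by
  show (caFirsts ((PySem.Chars.splitOn input.toList ['\n']).dropLast.foldl caStepB ([], [])).1
      (PySem.Chars.splitOn ((PySem.Chars.splitOn input.toList ['\n']).getLastD []) [' ']),
    ((PySem.Chars.splitOn input.toList ['\n']).dropLast.foldl caStepB ([], [])).2) = _
  rw [foldB, caFirsts_eq]
  unfold caBfun caFline
  simp

lemma caFline_nodelim (b : List Char) (h : ' ' ∉ b) : caFline b = [] := by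
  unfold caFline
  rw [splitOn_single, caSplit_no_delim ' ' b h]
  simp

lemma caSline_nodelim (b : List Char) (h : ' ' ∉ b) :
    caSline b = if b ≠ [] then [caInt b] else [] := by
  unfold caSline
  rw [splitOn_single, caSplit_no_delim ' ' b h]
  simp [List.getLastD]

lemma caBfun_cons (l : List Char) (L : List (List Char)) (hL : L ≠ []) :
    caBfun (l :: L) = (caFline l ++ (caBfun L).1, caSline l ++ (caBfun L).2) := by
  cases L with
  | nil => exact absurd rfl hL
  | cons x xs =>
    unfold caBfun
    simp [List.append_assoc]

lemma caFline_glue (b l : List Char) (h : ' ' ∉ b) :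
    caFline (b ++ ' ' :: l) = (if b ≠ [] then [caInt b] else []) ++ caFline l := by
  unfold caFline
  rw [splitOn_single, splitOn_single, caSplit_append ' ' b (' ' :: l) h]
  simp only [caSplit]
  by_cases hb : b = [] <;> simp [hb]

lemma caSline_glue (b l : List Char) (h : ' ' ∉ b) :
    caSline (b ++ ' ' :: l) = caSline l := by
  unfold caSline
  rw [splitOn_single, splitOn_single, caSplit_append ' ' b (' ' :: l) h]
  simp [caSplit]

lemma caBfun_glue (b q1 : List Char) (q2 : List (List Char)) (hsp : ' ' ∉ b) :
    caBfun ((b ++ ' ' :: q1) :: q2)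
      = ((if b ≠ [] then [caInt b] else []) ++ (caBfun (q1 :: q2)).1, (caBfun (q1 :: q2)).2) := by
  cases q2 with
  | nil =>
    unfold caBfun
    simp [caFline_glue b q1 hsp]
  | cons x xs =>
    rw [caBfun_cons _ (x :: xs) (List.cons_ne_nil x xs),
      caBfun_cons q1 (x :: xs) (List.cons_ne_nil x xs)]
    simp [caFline_glue b q1 hsp, caSline_glue b q1 hsp, List.append_assoc]

lemma main_lemma (cs : List Char) : ∀ (b : List Char), ' ' ∉ b → '\n' ∉ b →
    caBfun ((b ++ (caSplit '\n' cs).1) :: (caSplit '\n' cs).2) = (runA b cs).1 := by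
  induction cs with
  | nil =>
    intro b hsp hnl
    unfold caBfun
    simp [caSplit, runA, caFline_nodelim b hsp]
  | cons c cs ih =>
    intro b hsp hnl
    have h2 := ih [] (by simp) (by simp)
    simp only [List.nil_append] at h2
    by_cases hnlc : c = '\n'
    · subst hnlc
      simp only [caSplit]
      rw [if_true]
      dsimp only
      rw [List.append_nil, caBfun_cons b _ (List.cons_ne_nil _ _), h2]
      rw [runA, if_neg (by simp : ¬('\n' ≠ ' ' ∧ '\n' ≠ '\n'))]
      by_cases hb : b = []
      · subst hb
        simp [caFline_nodelim ([] : List Char) (by simp),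
          caSline_nodelim ([] : List Char) (by simp)]
      · rw [if_neg hb]
        simp [caFline_nodelim b hsp, caSline_nodelim b hsp, hb]
    · by_cases hspc : c = ' '
      · subst hspc
        simp only [caSplit]
        rw [if_neg hnlc]
        dsimp only
        rw [caBfun_glue b _ _ hsp, h2]
        rw [runA, if_neg (by simp : ¬(' ' ≠ ' ' ∧ ' ' ≠ '\n'))]
        by_cases hb : b = []
        · subst hb; simp
        · rw [if_neg hb]
          simp [hb]
      · have hcond : c ≠ ' ' ∧ c ≠ '\n' := ⟨hspc, hnlc⟩
        simp only [caSplit]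
        rw [if_neg hnlc]
        dsimp only
        rw [runA, if_pos hcond]
        have h3 := ih (b ++ [c])
          (by simp [List.mem_append]; exact ⟨hsp, fun h => hspc h.symm⟩)
          (by simp [List.mem_append]; exact ⟨hnl, fun h => hnlc h.symm⟩)
        simpa using h3

-- ===== VERDICT (by name: the statement is the Claim_ definition above) =====
theorem construct_arrays_spec : Claim_equal_construct_arrays := by
  intro input _ _
  unfold Spec_construct_arrays
  have hA : construct_arrays input = (runA [] input.toList).1 := by
    show ((input.toList.foldl caStepA ([], [], [])).1,
      (input.toList.foldl caStepA ([], [], [])).2.1) = _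
    rw [foldA]
    simp
  have hB : construct_arrays_alt input = (runA [] input.toList).1 := by
    rw [alt_eq, splitOn_single]
    have := main_lemma input.toList [] (by simp) (by simp)
    simpa using this
  rw [hA, hB]
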